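-- pv_equiv track=rewrite | github.com/darsovit/AdventOfCode2020 | Day04/Day04.py | generatePassport
-- ===== SOURCE A (Python) =====
-- def buildPassport( line, passportParts ):
--     parts = line.split(' ')
--     for part in parts:
--         (key,value) = part.split(':')
--         passportParts[key]=value
--
-- def generatePassport(input):
--     passportParts = dict()
--     for line in input:
--         if line == '':
--             yield passportParts
--             passportParts = dict()
--         else:
--             buildPassport( line, passportParts )
--     yield passportParts
-- ===== SOURCE B (Python) =====
-- def generatePassport(input):
--     # Split the line list on blank lines by repeated index()/slicing, then build each
--     # passport dict in one comprehension over the block's tokens.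
--     def parse(block):
--         return {k: v for line in block
--                      for k, v in (tok.split(':') for tok in line.split(' '))}
--     lines = list(input)
--     while '' in lines:
--         i = lines.index('')
--         yield parse(lines[:i])
--         lines = lines[i+1:]
--     yield parse(lines)
-- ===== Notes on version B (the rewrite author's own statement) =====
-- stated objective: alternative
-- what changed: B replaces A's single left-to-right pass that mutates a running dict and flushes it on each blank line by repeatedly locating the next blank line with index() and slicing the block off, parsing each block independently with one dict comprehension over its tokens.
import Mathlib
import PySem

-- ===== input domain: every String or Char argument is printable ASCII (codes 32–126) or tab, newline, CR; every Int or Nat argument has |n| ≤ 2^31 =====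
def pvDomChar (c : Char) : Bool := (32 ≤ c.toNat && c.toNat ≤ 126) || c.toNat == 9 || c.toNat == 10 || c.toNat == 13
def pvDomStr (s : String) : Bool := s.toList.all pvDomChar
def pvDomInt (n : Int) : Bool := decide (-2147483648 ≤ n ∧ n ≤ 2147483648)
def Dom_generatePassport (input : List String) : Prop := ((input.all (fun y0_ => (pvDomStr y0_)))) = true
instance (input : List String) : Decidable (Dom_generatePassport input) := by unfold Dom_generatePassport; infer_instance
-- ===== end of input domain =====

-- B splits the line list on blank lines by repeated index()/slicing and parses each block
-- with one dict comprehension, instead of A's single pass mutating a running dict;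
-- equivalence of the RETURN value (the generators fully consumed).

-- ===== PORT A =====
-- `part.split(':')` with exactly two pieces updates the dict; on any other shape Python
-- raises ValueError (excluded by Pre_), so the port leaves the dict unchanged there.
def buildPassport (line : String) (passportParts : PySem.Dict String String) :
    PySem.Dict String String :=
  ((PySem.Str.split? line " ").getD []).foldl
    (fun d part =>
      match (PySem.Str.split? part ":").getD [] with
      | [key, value] => d.insert key value
      | _ => d)
    passportParts

def generatePassport (input : List String) : List (List (String × String)) :=
  let r := input.foldl
    (fun (s : List (List (String × String)) × PySem.Dict String String) line =>
      if line = "" then (s.1 ++ [s.2.items], PySem.Dict.empty)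
      else (s.1, buildPassport line s.2))
    ([], PySem.Dict.empty)
  r.1 ++ [r.2.items]

-- ===== PORT B =====
-- `{k: v for line in block for k, v in (tok.split(':') for tok in line.split(' '))}`;
-- the unpack raises ValueError unless the split has exactly two pieces (excluded by Pre_),
-- so the port skips such tokens.
def gpParse (block : List String) : List (String × String) :=
  ((block.flatMap (fun line => (PySem.Str.split? line " ").getD [])).foldl
    (fun d tok =>
      match (PySem.Str.split? tok ":").getD [] with
      | [k, v] => d.insert k v
      | _ => d)
    (PySem.Dict.empty : PySem.Dict String String)).items

-- cited by the port's decreasing_by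
theorem gpDropLt (lines : List String) (i : Nat)
    (h : PySem.List.index? lines "" = some i) :
    (lines.drop (i + 1)).length < lines.length := by
  obtain ⟨pre, suf, hsplit, hlen, -⟩ := (PySem.List.index?_eq_some_iff _ _ _).mp h
  subst hsplit
  simp

-- `while '' in lines: i = lines.index(''); yield parse(lines[:i]); lines = lines[i+1:]`
-- (the `'' in lines` test and `lines.index('')` are the one scan `index?` performs)
def generatePassport_alt (lines : List String) : List (List (String × String)) :=
  match h : PySem.List.index? lines "" with
  | some i =>
      gpParse (PySem.List.slice lines none (some (i : Int)))
        :: generatePassport_alt (PySem.List.slice lines (some ((i : Int) + 1)) none)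
  | none => [gpParse lines]
termination_by lines.length
decreasing_by
  have hc : ((i : Int) + 1) = ((i + 1 : Nat) : Int) := by push_cast; ring
  rw [hc, PySem.List.slice_from_natCast]
  exact gpDropLt lines i h

-- ===== PRECONDITION & SPEC =====
-- Pre_ excludes exactly the inputs on which Python A raises ValueError: a non-empty line
-- containing a space-separated token that does not split on ':' into exactly two pieces.
def Pre_generatePassport (input : List String) : Prop :=
  ∀ line ∈ input, line ≠ "" →
    ∀ tok ∈ (PySem.Str.split? line " ").getD [], ((PySem.Str.split? tok ":").getD []).length = 2
instance (input : List String) : Decidable (Pre_generatePassport input) := by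
  unfold Pre_generatePassport; infer_instance
def pvWitness_generatePassport : List String := ["ecl:gry pid:860", "", "byr:1937"]

def Spec_generatePassport (input : List String) (out : List (List (String × String))) : Prop :=
  out = generatePassport_alt input
instance (input : List String) (out : List (List (String × String))) :
    Decidable (Spec_generatePassport input out) := by unfold Spec_generatePassport; infer_instance

-- ===== CLAIM (what is proved, stated in full; the proofs are below) =====
def Claim_equal_generatePassport : Prop := ∀ (input : List String), Dom_generatePassport input → Pre_generatePassport input → Spec_generatePassport input (generatePassport input)

-- ===== LEMMAS AND PROOFS =====

-- the blank-separated blocks of a line list, abstractly (proof-only helper)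
def gpBlocks : List String → List (List String)
  | [] => [[]]
  | l :: ls =>
      if l = "" then [] :: gpBlocks ls
      else
        match gpBlocks ls with
        | b :: bs => (l :: b) :: bs
        | [] => [[l]]

lemma gpBlocks_ne_nil (ls : List String) : gpBlocks ls ≠ [] := by
  cases ls with
  | nil => simp [gpBlocks]
  | cons l ls =>
    simp only [gpBlocks]
    split
    · simp
    · split <;> simp

lemma gpBlocks_no_blank (ls : List String) (h : "" ∉ ls) : gpBlocks ls = [ls] := by
  induction ls with
  | nil => rfl
  | cons l ls ih =>
    have hl : l ≠ "" := by rintro rfl; exact h (by simp)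
    have := ih (fun hm => h (by simp [hm]))
    simp [gpBlocks, hl, this]

-- B's recursion computes gpParse over gpBlocks
lemma alt_eq_blocks_aux (n : Nat) : ∀ lines : List String, lines.length ≤ n →
    generatePassport_alt lines = (gpBlocks lines).map gpParse := by
  induction n with
  | zero =>
    intro lines hlen
    have : lines = [] := List.length_eq_zero_iff.mp (Nat.le_zero.mp hlen)
    subst this
    rw [generatePassport_alt.eq_def]
    simp [PySem.List.index?_eq_idxOf?, gpBlocks]
  | succ n ih =>
    intro lines hlen
    rw [generatePassport_alt.eq_def]
    split
    · rename_i i h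
      obtain ⟨pre, suf, hsplit, hlenp, hnot⟩ := (PySem.List.index?_eq_some_iff _ _ _).mp h
      subst hsplit
      have hc : ((i : Int) + 1) = ((i + 1 : Nat) : Int) := by push_cast; ring
      rw [hc, PySem.List.slice_from_natCast, PySem.List.slice_to_natCast]
      have htake : (pre ++ "" :: suf).take i = pre := by rw [← hlenp]; simp
      have hdrop : (pre ++ "" :: suf).drop (i + 1) = suf := by
        rw [← hlenp]
        have h1 : pre.length + 1 = (pre ++ [("" : String)]).length := by simp
        have h2 : pre ++ ("" : String) :: suf = (pre ++ [""]) ++ suf := by simp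
        rw [h1, h2, List.drop_left]
      rw [htake, hdrop]
      have hsuf : suf.length ≤ n := by
        have := hlen; simp at this; omega
      rw [ih suf hsuf]
      have key : ∀ (p : List String), "" ∉ p →
          gpBlocks (p ++ "" :: suf) = p :: gpBlocks suf := by
        intro p
        induction p with
        | nil => intro _; simp [gpBlocks]
        | cons x xs ihp =>
          intro hx
          have hxne : x ≠ "" := by rintro rfl; exact hx (by simp)
          have := ihp (fun hm => hx (by simp [hm]))
          simp [gpBlocks, hxne, this]
      rw [key pre hnot]
      simp
    · rename_i h
      have : "" ∉ lines := (PySem.List.index?_eq_none_iff _ _).mp h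
      rw [gpBlocks_no_blank lines this]
      rfl

lemma alt_eq_blocks (lines : List String) :
    generatePassport_alt lines = (gpBlocks lines).map gpParse :=
  alt_eq_blocks_aux lines.length lines le_rfl

-- gpParse as a per-line fold of buildPassport
lemma gpParse_eq_fold (d : PySem.Dict String String) (b : List String) :
    ((b.flatMap (fun line => (PySem.Str.split? line " ").getD [])).foldl
      (fun d tok =>
        match (PySem.Str.split? tok ":").getD [] with
        | [k, v] => d.insert k v
        | _ => d) d)
    = b.foldl (fun d line => buildPassport line d) d := by
  induction b generalizing d with
  | nil => rfl
  | cons l b ih => simp [List.flatMap_cons, List.foldl_append, ih, buildPassport]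

-- A's fold, generalized over the accumulated output and the running dict
lemma loopA (ls : List String) : ∀ (acc : List (List (String × String)))
    (d : PySem.Dict String String) (b : List String) (bs : List (List String)),
    gpBlocks ls = b :: bs →
    (let r := ls.foldl
      (fun (s : List (List (String × String)) × PySem.Dict String String) line =>
        if line = "" then (s.1 ++ [s.2.items], PySem.Dict.empty)
        else (s.1, buildPassport line s.2))
      (acc, d)
     r.1 ++ [r.2.items])
    = acc ++ (b.foldl (fun d line => buildPassport line d) d).items :: bs.map gpParse := by
  induction ls with
  | nil =>
    intro acc d b bs hb
    simp [gpBlocks] at hb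
    obtain ⟨rfl, rfl⟩ := hb
    simp
  | cons l ls ih =>
    intro acc d b bs hb
    by_cases hl : l = ""
    · subst hl
      simp only [gpBlocks, reduceIte] at hb
      obtain ⟨rfl, rfl⟩ := List.cons.inj hb
      obtain ⟨b', bs', hb'⟩ : ∃ b' bs', gpBlocks ls = b' :: bs' := by
        cases h : gpBlocks ls with
        | nil => exact absurd h (gpBlocks_ne_nil ls)
        | cons x xs => exact ⟨x, xs, rfl⟩
      have := ih (acc ++ [d.items]) PySem.Dict.empty b' bs' hb'
      simp only [List.foldl_cons, reduceIte] at *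
      rw [this, hb']
      simp [gpParse, gpParse_eq_fold]
    · simp only [gpBlocks, if_neg hl] at hb
      obtain ⟨b', bs', hb'⟩ : ∃ b' bs', gpBlocks ls = b' :: bs' := by
        cases h : gpBlocks ls with
        | nil => exact absurd h (gpBlocks_ne_nil ls)
        | cons x xs => exact ⟨x, xs, rfl⟩
      rw [hb'] at hb
      obtain ⟨rfl, rfl⟩ := List.cons.inj hb
      have := ih acc (buildPassport l d) b' bs' hb'
      simp only [List.foldl_cons, if_neg hl] at *
      rw [this]

-- ===== VERDICT (by name: the statement is the Claim_ definition above) =====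
theorem generatePassport_spec : Claim_equal_generatePassport := by
  intro input _ _
  unfold Spec_generatePassport
  rw [alt_eq_blocks]
  obtain ⟨b, bs, hb⟩ : ∃ b bs, gpBlocks input = b :: bs := by
    cases h : gpBlocks input with
    | nil => exact absurd h (gpBlocks_ne_nil input)
    | cons x xs => exact ⟨x, xs, rfl⟩
  have := loopA input [] PySem.Dict.empty b bs hb
  unfold generatePassport
  rw [this, hb]
  simp [gpParse, gpParse_eq_fold]
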